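-- pv_equiv track=rewrite | github.com/matrix0394/The-Value-Atlas-of-AI-Code | src/llm_values/llm_multilingual_visualization.py | _extract_language_from_country_code
-- ===== SOURCE A (Python) =====
-- def _extract_language_from_country_code(country_code) -> str:
--     """Extract a language code from ``country_code``."""
--     if not country_code or not isinstance(country_code, str):
--         return 'en'
--
--     if country_code.endswith('_zh-cn'):
--         return 'zh-cn'
--
--     for lang in ['en', 'fr', 'es', 'ru', 'ar']:
--         if country_code.endswith(f'_{lang}'):
--             return lang
--
--     return 'en'
-- ===== SOURCE B (Python) =====
-- _LANGS = {'zh-cn', 'en', 'fr', 'es', 'ru', 'ar'}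
--
-- def _extract_language_from_country_code(country_code) -> str:
--     """Extract a language code from ``country_code``."""
--     if not country_code or not isinstance(country_code, str):
--         return 'en'
--     parts = country_code.rsplit('_', 1)
--     if len(parts) == 2 and parts[1] in _LANGS:
--         return parts[1]
--     return 'en'
-- ===== Notes on version B (the rewrite author's own statement) =====
-- stated objective: simpler
-- what changed: Replaces the six repeated endswith scans (zh-cn special case plus a loop) with one rsplit('_', 1) and a single set-membership test on the last segment.
import Mathlib
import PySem

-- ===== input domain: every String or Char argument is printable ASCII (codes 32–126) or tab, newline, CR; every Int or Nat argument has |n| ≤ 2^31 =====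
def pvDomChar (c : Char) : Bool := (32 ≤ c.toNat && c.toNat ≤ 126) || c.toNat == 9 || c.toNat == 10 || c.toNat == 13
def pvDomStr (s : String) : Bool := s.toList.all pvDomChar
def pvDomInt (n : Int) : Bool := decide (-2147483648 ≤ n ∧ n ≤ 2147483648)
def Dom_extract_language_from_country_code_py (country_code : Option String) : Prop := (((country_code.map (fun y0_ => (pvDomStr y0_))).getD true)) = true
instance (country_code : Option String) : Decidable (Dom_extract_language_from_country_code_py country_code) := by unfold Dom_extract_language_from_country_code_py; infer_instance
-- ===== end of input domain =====

-- B replaces A's six repeated endswith checks with one rsplit('_', 1) plus a single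
-- membership test on the last segment (objective: simpler). Return value only; no mutation.

-- ===== PORT A =====
-- the 'for lang in [...]' loop with early return
def pvLoopA (s : String) : List String → Option String
  | [] => none
  | lang :: rest =>
    if PySem.Str.endswith s ("_" ++ lang) then some lang else pvLoopA s rest

def extract_language_from_country_code_py (country_code : Option String) : String :=
  match country_code with
  | none => "en"                      -- not country_code (None) / not a str
  | some s =>
    if s = "" then "en"               -- not country_code (empty string)
    else if PySem.Str.endswith s "_zh-cn" then "zh-cn"
    else match pvLoopA s ["en", "fr", "es", "ru", "ar"] with
         | some lang => lang
         | none => "en"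

-- ===== PORT B =====
-- "is not the separator '_'" test used by the hand-ported rsplit
def pvNotU (c : Char) : Bool := c != '_'

-- country_code.rsplit('_', 1) ported by hand (PySem has no rsplit); exact for this
-- one-character separator: split once at the LAST '_' if present, else [s].
def pvRsplitU1 (s : String) : List String :=
  let r := s.toList.reverse
  if '_' ∈ r then
    [String.ofList ((r.dropWhile pvNotU).tail.reverse),
     String.ofList ((r.takeWhile pvNotU).reverse)]
  else [s]

def extract_language_from_country_code_py_alt (country_code : Option String) : String :=
  match country_code with
  | none => "en"
  | some s =>
    if s = "" then "en"
    else match pvRsplitU1 s with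
         | [_, p1] =>
           if ["zh-cn", "en", "fr", "es", "ru", "ar"].contains p1 then p1 else "en"
         | _ => "en"

-- ===== PRECONDITION & SPEC =====
def Spec_extract_language_from_country_code_py (country_code : Option String) (out : String) : Prop := out = extract_language_from_country_code_py_alt country_code
instance (country_code : Option String) (out : String) : Decidable (Spec_extract_language_from_country_code_py country_code out) := by unfold Spec_extract_language_from_country_code_py; infer_instance

-- ===== CLAIM (what is proved, stated in full; the proofs are below) =====
def Claim_equal_extract_language_from_country_code_py : Prop := ∀ (country_code : Option String), Dom_extract_language_from_country_code_py country_code → Spec_extract_language_from_country_code_py country_code (extract_language_from_country_code_py country_code)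

-- ===== LEMMAS AND PROOFS =====

theorem pvNotU_true {c : Char} (h : c ≠ '_') : pvNotU c = true := by simp [pvNotU, h]
theorem pvNotU_ne {c : Char} (h : pvNotU c = true) : c ≠ '_' := by simpa [pvNotU] using h

-- decompose a list containing '_' around its first occurrence
theorem pv_split_at_first {r : List Char} (h : '_' ∈ r) :
    r = r.takeWhile pvNotU ++ '_' :: (r.dropWhile pvNotU).tail := by
  induction r with
  | nil => cases h
  | cons a r ih =>
    by_cases ha : a = '_'
    · subst ha; simp [pvNotU]
    · have hm : '_' ∈ r := by cases h with
        | head => exact absurd rfl ha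
        | tail _ h => exact h
      simp only [List.takeWhile_cons, List.dropWhile_cons, pvNotU_true ha]
      exact congrArg (a :: ·) (ih hm)

theorem pv_not_mem_takeWhile (r : List Char) :
    '_' ∉ r.takeWhile pvNotU := by
  intro h
  exact pvNotU_ne (List.mem_takeWhile_imp h) rfl

-- the key characterisation: with no '_' in w or t, (w ++ ['_']) prefixes t ++ '_' :: d iff w = t
theorem pv_prefix_iff (w : List Char) (hw : '_' ∉ w) :
    ∀ (t d : List Char), '_' ∉ t → ((w ++ ['_']) <+: (t ++ '_' :: d) ↔ w = t) := by
  induction w with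
  | nil =>
    intro t d ht
    cases t with
    | nil => simp
    | cons c t' =>
      simp only [List.nil_append, List.cons_append, List.cons_prefix_cons]
      constructor
      · rintro ⟨h1, -⟩
        exact absurd h1.symm (fun hc => ht (hc ▸ List.mem_cons_self))
      · intro h; cases h
  | cons a w' ih =>
    intro t d ht
    have hw' : '_' ∉ w' := fun h => hw (List.mem_cons_of_mem _ h)
    have ha : a ≠ '_' := fun h => hw (h ▸ List.mem_cons_self)
    cases t with
    | nil =>
      simp only [List.nil_append, List.cons_append, List.cons_prefix_cons]
      constructor
      · rintro ⟨h1, -⟩; exact absurd h1 ha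
      · intro h; cases h
    | cons c t' =>
      have ht' : '_' ∉ t' := fun h => ht (List.mem_cons_of_mem _ h)
      simp only [List.cons_append, List.cons_prefix_cons]
      rw [ih hw' t' d ht']
      constructor
      · rintro ⟨h1, h2⟩; rw [h1, h2]
      · intro h; injection h with h1 h2; exact ⟨h1, h2⟩

-- endswith as a statement about the reversed character list
theorem pv_endswith_iff (s : String) (L : List Char) (p : String) (hp : p.toList = '_' :: L) :
    PySem.Str.endswith s p = true ↔ (L.reverse ++ ['_']) <+: s.toList.reverse := by
  rw [PySem.Str.endswith_eq, hp, PySem.Chars.endswith_iff,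
    show L.reverse ++ ['_'] = ('_' :: L).reverse from by simp, List.reverse_prefix]

theorem pv_endswith_false (s : String) (L : List Char) (p : String) (hp : p.toList = '_' :: L)
    (h : '_' ∉ s.toList) : PySem.Str.endswith s p = false := by
  rw [← Bool.not_eq_true, pv_endswith_iff s L p hp]
  intro hpre
  have : '_' ∈ s.toList.reverse := hpre.subset (by simp)
  simp at this
  exact h this

-- per-language reduction when '_' occurs in s
theorem pv_endswith_eq_iff (s : String) (h : '_' ∈ s.toList) (L : List Char)
    (p : String) (hp : p.toList = '_' :: L) (hL : '_' ∉ L) :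
    PySem.Str.endswith s p = true ↔
      s.toList.reverse.takeWhile pvNotU = L.reverse := by
  have hr : '_' ∈ s.toList.reverse := by simpa using h
  rw [pv_endswith_iff s L p hp]
  conv_lhs => rw [pv_split_at_first hr]
  rw [pv_prefix_iff L.reverse (by simpa using hL) _ _ (pv_not_mem_takeWhile _)]
  exact ⟨Eq.symm, Eq.symm⟩

theorem pv_main (s : String) :
    extract_language_from_country_code_py (some s)
      = extract_language_from_country_code_py_alt (some s) := by
  have a1 : ("_" ++ "en" : String) = "_en" := rfl
  have a2 : ("_" ++ "fr" : String) = "_fr" := rfl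
  have a3 : ("_" ++ "es" : String) = "_es" := rfl
  have a4 : ("_" ++ "ru" : String) = "_ru" := rfl
  have a5 : ("_" ++ "ar" : String) = "_ar" := rfl
  by_cases hs : s = ""
  · subst hs; rfl
  · by_cases hu : '_' ∈ s.toList
    · -- decompose at the last underscore; both results depend only on the tail segment t
      set t := s.toList.reverse.takeWhile pvNotU with ht
      have hzh : PySem.Str.endswith s "_zh-cn" = true ↔ t = ['n','c','-','h','z'] :=
        pv_endswith_eq_iff s hu ['z','h','-','c','n'] _ rfl (by decide)
      have hen : PySem.Str.endswith s "_en" = true ↔ t = ['n','e'] :=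
        pv_endswith_eq_iff s hu ['e','n'] _ rfl (by decide)
      have hfr : PySem.Str.endswith s "_fr" = true ↔ t = ['r','f'] :=
        pv_endswith_eq_iff s hu ['f','r'] _ rfl (by decide)
      have hes : PySem.Str.endswith s "_es" = true ↔ t = ['s','e'] :=
        pv_endswith_eq_iff s hu ['e','s'] _ rfl (by decide)
      have hru : PySem.Str.endswith s "_ru" = true ↔ t = ['u','r'] :=
        pv_endswith_eq_iff s hu ['r','u'] _ rfl (by decide)
      have har : PySem.Str.endswith s "_ar" = true ↔ t = ['r','a'] :=
        pv_endswith_eq_iff s hu ['a','r'] _ rfl (by decide)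
      have hur : '_' ∈ s.toList.reverse := by simpa using hu
      have hB : extract_language_from_country_code_py_alt (some s)
          = (if ["zh-cn","en","fr","es","ru","ar"].contains (String.ofList t.reverse)
             then String.ofList t.reverse else "en") := by
        simp only [extract_language_from_country_code_py_alt, pvRsplitU1, if_neg hs,
          if_pos hur]
        rfl
      have hA : extract_language_from_country_code_py (some s)
          = (if PySem.Str.endswith s "_zh-cn" then "zh-cn"
             else if PySem.Str.endswith s "_en" then "en"
             else if PySem.Str.endswith s "_fr" then "fr"
             else if PySem.Str.endswith s "_es" then "es"
             else if PySem.Str.endswith s "_ru" then "ru"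
             else if PySem.Str.endswith s "_ar" then "ar"
             else "en") := by
        simp only [extract_language_from_country_code_py, pvLoopA, if_neg hs,
          a1, a2, a3, a4, a5]
        split_ifs <;> rfl
      rw [hA, hB]
      have hinj : ∀ (l : List Char) (u : String),
          String.ofList l.reverse = u → l = u.toList.reverse := by
        intro l u hh; rw [← hh]; simp
      by_cases h1 : t = ['n','c','-','h','z']
      · rw [if_pos (hzh.mpr h1), h1]; decide
      · rw [if_neg (fun hh => h1 (hzh.mp hh))]
        by_cases h2 : t = ['n','e']
        · rw [if_pos (hen.mpr h2), h2]; decide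
        · rw [if_neg (fun hh => h2 (hen.mp hh))]
          by_cases h3 : t = ['r','f']
          · rw [if_pos (hfr.mpr h3), h3]; decide
          · rw [if_neg (fun hh => h3 (hfr.mp hh))]
            by_cases h4 : t = ['s','e']
            · rw [if_pos (hes.mpr h4), h4]; decide
            · rw [if_neg (fun hh => h4 (hes.mp hh))]
              by_cases h5 : t = ['u','r']
              · rw [if_pos (hru.mpr h5), h5]; decide
              · rw [if_neg (fun hh => h5 (hru.mp hh))]
                by_cases h6 : t = ['r','a']
                · rw [if_pos (har.mpr h6), h6]; decide
                · rw [if_neg (fun hh => h6 (har.mp hh))]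
                  -- B's membership test must also fail
                  rw [if_neg]
                  intro hc
                  simp only [List.contains_eq_mem, List.mem_cons, List.not_mem_nil,
                    or_false, decide_eq_true_eq] at hc
                  rcases hc with hc | hc | hc | hc | hc | hc
                  · exact h1 (by simpa using hinj _ _ hc)
                  · exact h2 (by simpa using hinj _ _ hc)
                  · exact h3 (by simpa using hinj _ _ hc)
                  · exact h4 (by simpa using hinj _ _ hc)
                  · exact h5 (by simpa using hinj _ _ hc)
                  · exact h6 (by simpa using hinj _ _ hc)
    · -- no underscore: all of A's endswith checks are false, B's rsplit yields one part
      have hur : '_' ∉ s.toList.reverse := by simpa using hu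
      have e1 : PySem.Str.endswith s "_zh-cn" = false :=
        pv_endswith_false s ['z','h','-','c','n'] _ rfl hu
      have e2 : PySem.Str.endswith s "_en" = false :=
        pv_endswith_false s ['e','n'] _ rfl hu
      have e3 : PySem.Str.endswith s "_fr" = false :=
        pv_endswith_false s ['f','r'] _ rfl hu
      have e4 : PySem.Str.endswith s "_es" = false :=
        pv_endswith_false s ['e','s'] _ rfl hu
      have e5 : PySem.Str.endswith s "_ru" = false :=
        pv_endswith_false s ['r','u'] _ rfl hu
      have e6 : PySem.Str.endswith s "_ar" = false :=
        pv_endswith_false s ['a','r'] _ rfl hu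
      simp only [extract_language_from_country_code_py,
        extract_language_from_country_code_py_alt, pvLoopA, pvRsplitU1,
        if_neg hs, if_neg hur, a1, a2, a3, a4, a5, e1, e2, e3, e4, e5, e6]
      rfl

-- ===== VERDICT (by name: the statement is the Claim_ definition above) =====
theorem extract_language_from_country_code_py_spec : Claim_equal_extract_language_from_country_code_py := by
  intro cc _
  unfold Spec_extract_language_from_country_code_py
  cases cc with
  | none => rfl
  | some s => exact pv_main s
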